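-- pv_equiv track=rewrite | github.com/ssmingz/VBFL_hw | collect_changed_coverage.py | split_for_var
-- ===== SOURCE A (Python) =====
-- def split_for_var(vlist:list):
--     result = set()
--     for v in vlist:  # no blank space in v
--         flag = False
--         for r in [',', '++', '--', '+','-','*','/','=','+=','-=','*=','/=','==','!=','&&','||','&','|','(',')']:
--             if r in v:
--                 flag = True
--                 result.update(split_for_var(v.split(r)))
--                 break
--         if not flag:
--             result.add(v)
--     return result
-- ===== SOURCE B (Python) =====
-- def split_for_var(vlist: list):
--     # Staged passes instead of recursion: run one global splitting pass per
--     # operator, in the same priority order, over the whole list of pieces.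
--     # This is correct because split pieces are substrings of the original, so
--     # a piece can never contain an operator of higher priority than the one it
--     # was just split on; operators later in the list whose sub-operators come
--     # earlier (e.g. '+=') are no-op passes, just as the original never picks them.
--     pieces = list(vlist)
--     for op in [',', '++', '--', '+', '-', '*', '/', '=', '+=', '-=', '*=', '/=',
--                '==', '!=', '&&', '||', '&', '|', '(', ')']:
--         pieces = [q for p in pieces for q in p.split(op)]
--     return set(pieces)
-- ===== Notes on version B (the rewrite author's own statement) =====
-- stated objective: alternative
-- what changed: Replaces A's per-string recursion (pick the first operator present, split, recurse on the pieces) with a non-recursive pipeline of staged passes: one global splitting pass per operator, in the same priority order, over the whole flat list of pieces; operator-free pieces are what remains and are collected into the set at the end.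
import Mathlib
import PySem

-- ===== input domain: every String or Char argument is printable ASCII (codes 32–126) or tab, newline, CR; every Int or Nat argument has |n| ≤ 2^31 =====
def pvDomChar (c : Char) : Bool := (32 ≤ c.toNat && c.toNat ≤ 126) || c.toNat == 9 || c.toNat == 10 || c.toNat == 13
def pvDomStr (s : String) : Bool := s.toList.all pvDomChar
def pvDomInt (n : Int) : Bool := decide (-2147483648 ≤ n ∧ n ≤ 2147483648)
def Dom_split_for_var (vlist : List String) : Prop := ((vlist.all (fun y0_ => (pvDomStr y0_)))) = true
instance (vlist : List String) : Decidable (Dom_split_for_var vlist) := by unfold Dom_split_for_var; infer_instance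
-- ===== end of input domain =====

-- B replaces A's per-string recursion by staged global splitting passes, one pass
-- per operator in the same priority order over the whole piece list (alternative
-- decomposition; no speed claim).

-- ===== PORT A =====
-- the operator priority list, shared verbatim by both Python programs
def pvOps : List String := [",", "++", "--", "+", "-", "*", "/", "=", "+=", "-=", "*=", "/=", "==", "!=", "&&", "||", "&", "|", "(", ")"]

-- termination measure for A's recursion: Σ (2·|s| + 1); the lemmas up to pv_ops_len are cited by decreasing_by
def pvMeasure (l : List String) : Nat := (l.map fun s => 2 * s.toList.length + 1).sum

def pvMC (l : List (List Char)) : Nat := (l.map fun p => 2 * p.length + 1).sum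

theorem pv_go_le (sep : List Char) (hsep : 1 ≤ sep.length) : ∀ (fuel : Nat) (l cur : List Char) (acc : List (List Char)),
    pvMC (PySem.Chars.splitOn.go sep fuel l cur acc) ≤ pvMC acc + 2 * cur.length + 2 * l.length + 1 := by
  intro fuel
  induction fuel with
  | zero =>
    intro l cur acc
    simp [PySem.Chars.splitOn.go, pvMC]; omega
  | succ n ih =>
    intro l cur acc
    cases l with
    | nil => simp [PySem.Chars.splitOn.go, pvMC]; omega
    | cons c rest =>
      rw [PySem.Chars.splitOn.go]
      split
      · rename_i hp
        have hle : sep.length ≤ (c :: rest).length :=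
          (List.isPrefixOf_iff_prefix.mp hp).length_le
        have h2 := ih (List.drop sep.length (c :: rest)) [] ((cur.reverse :: acc))
        simp [pvMC] at h2 ⊢
        omega
      · have h2 := ih rest (c :: cur) acc
        simp [pvMC] at h2 ⊢
        omega

-- if the separator occurs, at least one cut is made, so the 2·Σ|piece| + #pieces bookkeeping strictly improves
theorem pv_go_lt (sep : List Char) (hsep : 1 ≤ sep.length) : ∀ (fuel : Nat) (l cur : List Char) (acc : List (List Char)),
    sep <:+: l → l.length < fuel →
    pvMC (PySem.Chars.splitOn.go sep fuel l cur acc) + 1 ≤ pvMC acc + 2 * cur.length + 2 * l.length + 1 := by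
  intro fuel
  induction fuel with
  | zero => intro l cur acc _ h; omega
  | succ n ih =>
    intro l cur acc hinf hlen
    cases l with
    | nil =>
      have : sep = [] := List.infix_nil.mp hinf
      simp [this] at hsep
    | cons c rest =>
      rw [PySem.Chars.splitOn.go]
      split
      · rename_i hp
        have hle : sep.length ≤ (c :: rest).length :=
          (List.isPrefixOf_iff_prefix.mp hp).length_le
        have h2 := pv_go_le sep hsep n (List.drop sep.length (c :: rest)) [] ((cur.reverse :: acc))
        simp [pvMC] at h2 ⊢
        omega
      · rename_i hp
        have hnp : ¬ sep <+: (c :: rest) := fun h => hp (List.isPrefixOf_iff_prefix.mpr h)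
        have hinf' : sep <:+: rest := by
          rcases List.infix_cons_iff.mp hinf with h | h
          · exact absurd h hnp
          · exact h
        have h2 := ih rest (c :: cur) acc hinf' (by simpa using Nat.lt_of_succ_lt_succ hlen)
        simp [pvMC] at h2 ⊢
        omega

theorem pv_split_measure {v r : String} (hin : PySem.Str.isIn r v = true) (hr : 1 ≤ r.toList.length) :
    pvMeasure ((PySem.Str.split? v r).getD []) < 2 * v.toList.length + 1 := by
  have hinf : r.toList <:+: v.toList := by
    rw [PySem.Str.isIn_eq] at hin
    exact (PySem.Chars.isIn_iff_infix _ _).mp hin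
  have hne : r.toList.isEmpty = false := by
    cases h : r.toList with
    | nil => simp [h] at hr
    | cons a l => simp
  have hmap : Option.map (List.map String.toList) (PySem.Str.split? v r)
      = some (PySem.Chars.splitOn v.toList r.toList) := by
    rw [PySem.Str.split?_map, PySem.Chars.split?]
    simp [hne]
  cases hs : PySem.Str.split? v r with
  | none => rw [hs] at hmap; simp at hmap
  | some ps =>
    rw [hs] at hmap
    simp only [Option.map_some, Option.some.injEq] at hmap
    have h2 := pv_go_lt r.toList hr (v.toList.length + 1) v.toList [] [] hinf (by omega)
    have hmc : pvMeasure ps = pvMC (ps.map String.toList) := by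
      unfold pvMeasure pvMC
      rw [List.map_map]; rfl
    rw [hmap] at hmc
    have hgo : PySem.Chars.splitOn v.toList r.toList
        = PySem.Chars.splitOn.go r.toList (v.toList.length + 1) v.toList [] [] := rfl
    simp only [pvMC, List.map_nil, List.sum_nil, List.length_nil] at h2
    show pvMeasure ps < 2 * v.toList.length + 1
    rw [hmc, pvMC, hgo]
    omega

theorem pv_ops_len : ∀ r ∈ pvOps, 1 ≤ r.toList.length := by decide

def split_for_var_go : List String → PySem.Set String → PySem.Set String
  | [], result => result
  | v :: rest, result =>
    match h : pvOps.find? (fun r => PySem.Str.isIn r v) with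
    | some r =>
      split_for_var_go rest
        (PySem.Set.update result
          (split_for_var_go ((PySem.Str.split? v r).getD []) PySem.Set.empty))
    | none => split_for_var_go rest (PySem.Set.add result v)
  termination_by l _ => pvMeasure l
  decreasing_by
  all_goals
    (simp only [pvMeasure, List.map_cons, List.sum_cons]
     first
     | (have hin := List.find?_some (p := fun r => PySem.Str.isIn r v) h
        have := pv_split_measure hin (pv_ops_len r (List.mem_of_find?_eq_some h))
        simp only [pvMeasure] at this
        omega)
     | omega)

def split_for_var (vlist : List String) : List String :=
  split_for_var_go vlist PySem.Set.empty

-- ===== PORT B =====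
-- Source B: pieces = list(vlist); for op in ops: pieces = [q for p in pieces for q in p.split(op)]; return set(pieces)
def split_for_var_alt (vlist : List String) : List String :=
  PySem.Set.ofList
    (pvOps.foldl (fun ps op => ps.flatMap (fun p => (PySem.Str.split? p op).getD [])) vlist)

-- ===== PRECONDITION & SPEC =====
def Spec_split_for_var (vlist : List String) (out : List String) : Prop := out = split_for_var_alt vlist
instance (vlist : List String) (out : List String) : Decidable (Spec_split_for_var vlist out) := by unfold Spec_split_for_var; infer_instance

-- ===== CLAIM (what is proved, stated in full; the proofs are below) =====
def Claim_equal_split_for_var : Prop := ∀ (vlist : List String), Dom_split_for_var vlist → Spec_split_for_var vlist (split_for_var vlist)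

-- ===== LEMMAS AND PROOFS =====

-- one splitting pass of one string, the staged pipeline, and the final token list of one string
def pvSpl (p op : String) : List String := (PySem.Str.split? p op).getD []

def pvStg (ops : List String) (ps : List String) : List String :=
  ops.foldl (fun ps op => ps.flatMap (fun p => pvSpl p op)) ps

def pvTk (v : String) : List String := pvStg pvOps [v]

theorem pv_spl_eq (p op : String) (h : op.toList ≠ []) :
    pvSpl p op = (PySem.Chars.splitOn p.toList op.toList).map String.ofList := by
  have hne : op.toList.isEmpty = false := by
    cases hh : op.toList with
    | nil => exact absurd hh h
    | cons a l => simp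
  have hmap : PySem.Str.split? p op
      = some ((PySem.Chars.splitOn p.toList op.toList).map String.ofList) := by
    rw [PySem.Str.split?, PySem.Chars.split?]
    simp [hne]
  rw [pvSpl, hmap]
  rfl

-- ---- structure of PySem.Chars.splitOn ----

theorem pv_go_acc (sep : List Char) : ∀ (fuel : Nat) (l cur : List Char) (acc : List (List Char)),
    PySem.Chars.splitOn.go sep fuel l cur acc = acc.reverse ++ PySem.Chars.splitOn.go sep fuel l cur [] := by
  intro fuel
  induction fuel with
  | zero => intro l cur acc; simp [PySem.Chars.splitOn.go]
  | succ n ih =>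
    intro l cur acc
    cases l with
    | nil => simp [PySem.Chars.splitOn.go]
    | cons c rest =>
      rw [PySem.Chars.splitOn.go, PySem.Chars.splitOn.go]
      split
      · rw [ih _ _ (cur.reverse :: acc), ih _ _ ([cur.reverse])]
        simp
      · rw [ih rest (c :: cur) acc]

theorem pv_go_fuel (sep : List Char) (hsep : sep ≠ []) : ∀ (f1 : Nat) (l cur : List Char) (f2 : Nat),
    l.length < f1 → l.length < f2 →
    PySem.Chars.splitOn.go sep f1 l cur [] = PySem.Chars.splitOn.go sep f2 l cur [] := by
  have hslen : 1 ≤ sep.length := by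
    cases sep with
    | nil => exact absurd rfl hsep
    | cons a s => simp
  intro f1
  induction f1 with
  | zero => intro l cur f2 h _; omega
  | succ n ih =>
    intro l cur f2 h1 h2
    cases l with
    | nil =>
      cases f2 with
      | zero => omega
      | succ m => simp [PySem.Chars.splitOn.go]
    | cons c rest =>
      cases f2 with
      | zero => omega
      | succ m =>
        rw [PySem.Chars.splitOn.go, PySem.Chars.splitOn.go]
        split
        · rename_i hp
          rw [pv_go_acc sep n, pv_go_acc sep m]
          have hd : (List.drop sep.length (c :: rest)).length < n := by
            simp at h1 ⊢; omega
          have hd2 : (List.drop sep.length (c :: rest)).length < m := by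
            simp at h2 ⊢; omega
          rw [ih _ [] m hd hd2]
        · have hr : rest.length < n := by simp at h1; omega
          have hr2 : rest.length < m := by simp at h2; omega
          rw [ih rest (c :: cur) m hr hr2]

-- first-piece/tail view of splitOn with a pending current token
theorem pv_go_head (sep : List Char) (hsep : sep ≠ []) : ∀ (n : Nat) (l cur : List Char), l.length < n →
    PySem.Chars.splitOn.go sep (l.length + 1) l cur []
      = (cur.reverse ++ (PySem.Chars.splitOn l sep).headI) :: (PySem.Chars.splitOn l sep).tail := by
  have hslen : 1 ≤ sep.length := by
    cases sep with
    | nil => exact absurd rfl hsep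
    | cons a s => simp
  intro n
  induction n with
  | zero => intro l cur h; omega
  | succ n ih =>
    intro l cur hlen
    cases l with
    | nil =>
      simp [PySem.Chars.splitOn.go, PySem.Chars.splitOn]
    | cons c rest =>
      simp only [List.length_cons]
      by_cases hp : sep.isPrefixOf (c :: rest)
      · have hpre := List.isPrefixOf_iff_prefix.mp hp
        have hle : sep.length ≤ (c :: rest).length := hpre.length_le
        have hdl : (List.drop sep.length (c :: rest)).length < rest.length + 1 := by
          simp at hle ⊢; omega
        have step : PySem.Chars.splitOn.go sep (rest.length + 1 + 1) (c :: rest) cur []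
            = cur.reverse :: PySem.Chars.splitOn.go sep (rest.length + 1) (List.drop sep.length (c :: rest)) [] [] := by
          rw [PySem.Chars.splitOn.go]
          simp only [hp, if_true]
          rw [pv_go_acc]
          simp
        have hfl : PySem.Chars.splitOn.go sep (rest.length + 1) (List.drop sep.length (c :: rest)) [] []
            = PySem.Chars.splitOn (List.drop sep.length (c :: rest)) sep := by
          rw [PySem.Chars.splitOn]
          exact pv_go_fuel sep hsep _ _ [] _ hdl (by omega)
        have hs : PySem.Chars.splitOn (c :: rest) sep
            = [] :: PySem.Chars.splitOn (List.drop sep.length (c :: rest)) sep := by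
          rw [PySem.Chars.splitOn]
          simp only [List.length_cons]
          rw [PySem.Chars.splitOn.go]
          simp only [hp, if_true]
          rw [pv_go_acc]
          simp [hfl]
        rw [step, hfl, hs]
        simp
      · have hpl : ¬ sep <+: (c :: rest) := fun h => hp (List.isPrefixOf_iff_prefix.mpr h)
        have hrn : rest.length < n := by simp at hlen; omega
        have step : PySem.Chars.splitOn.go sep (rest.length + 1 + 1) (c :: rest) cur []
            = PySem.Chars.splitOn.go sep (rest.length + 1) rest (c :: cur) [] := by
          rw [PySem.Chars.splitOn.go]
          simp only [hp, Bool.false_eq_true, if_false]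
        have ih1 := ih rest (c :: cur) hrn
        have ih2 := ih rest [c] hrn
        have hs : PySem.Chars.splitOn (c :: rest) sep
            = (c :: (PySem.Chars.splitOn rest sep).headI) :: (PySem.Chars.splitOn rest sep).tail := by
          rw [PySem.Chars.splitOn]
          simp only [List.length_cons]
          have step0 : PySem.Chars.splitOn.go sep (rest.length + 1 + 1) (c :: rest) [] []
              = PySem.Chars.splitOn.go sep (rest.length + 1) rest [c] [] := by
            rw [PySem.Chars.splitOn.go]
            simp only [hp, Bool.false_eq_true, if_false]
          rw [step0, ih2]
          simp
        rw [step, ih1, hs]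
        simp

theorem pv_splitOn_view (sep : List Char) (hsep : sep ≠ []) (l : List Char) :
    PySem.Chars.splitOn l sep
      = (PySem.Chars.splitOn l sep).headI :: (PySem.Chars.splitOn l sep).tail := by
  have h := pv_go_head sep hsep (l.length + 1) l [] (by omega)
  rw [PySem.Chars.splitOn, h]
  simp

theorem pv_splitOn_nil (sep : List Char) : PySem.Chars.splitOn [] sep = [[]] := by
  simp [PySem.Chars.splitOn, PySem.Chars.splitOn.go]

theorem pv_splitOn_cut (sep : List Char) (hsep : sep ≠ []) (c : Char) (rest : List Char)
    (hp : sep <+: (c :: rest)) :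
    PySem.Chars.splitOn (c :: rest) sep
      = [] :: PySem.Chars.splitOn (List.drop sep.length (c :: rest)) sep := by
  have hslen : 1 ≤ sep.length := by
    cases sep with
    | nil => exact absurd rfl hsep
    | cons a s => simp
  have hpb : sep.isPrefixOf (c :: rest) = true := List.isPrefixOf_iff_prefix.mpr hp
  have hle : sep.length ≤ (c :: rest).length := hp.length_le
  have hdl : (List.drop sep.length (c :: rest)).length < rest.length + 1 := by
    simp at hle ⊢; omega
  rw [PySem.Chars.splitOn]
  simp only [List.length_cons]
  rw [PySem.Chars.splitOn.go]
  simp only [hpb, if_true]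
  rw [pv_go_acc]
  simp only [List.reverse_nil, List.reverse_cons, List.nil_append]
  rw [pv_go_fuel sep hsep _ _ [] ((List.drop sep.length (c :: rest)).length + 1) hdl (by omega)]
  rw [PySem.Chars.splitOn]
  simp

theorem pv_splitOn_cons (sep : List Char) (hsep : sep ≠ []) (c : Char) (rest : List Char)
    (hp : ¬ sep <+: (c :: rest)) :
    PySem.Chars.splitOn (c :: rest) sep
      = (c :: (PySem.Chars.splitOn rest sep).headI) :: (PySem.Chars.splitOn rest sep).tail := by
  have hpb : sep.isPrefixOf (c :: rest) = false := by
    cases h : sep.isPrefixOf (c :: rest)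
    · rfl
    · exact absurd (List.isPrefixOf_iff_prefix.mp h) hp
  rw [PySem.Chars.splitOn]
  simp only [List.length_cons]
  rw [PySem.Chars.splitOn.go]
  simp only [hpb, Bool.false_eq_true, if_false]
  rw [pv_go_head sep hsep (rest.length + 1) rest [c] (by omega)]
  simp

-- splitting on an absent separator is a no-op
theorem pv_splitOn_no_occ (sep : List Char) (hsep : sep ≠ []) :
    ∀ (n : Nat) (l : List Char), l.length < n → ¬ sep <:+: l → PySem.Chars.splitOn l sep = [l] := by
  intro n
  induction n with
  | zero => intro l h; omega
  | succ n ih =>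
    intro l hlen hni
    cases l with
    | nil => exact pv_splitOn_nil sep
    | cons c rest =>
      have hp : ¬ sep <+: (c :: rest) := fun h => hni h.isInfix
      have hni' : ¬ sep <:+: rest := fun h => hni (List.infix_cons_iff.mpr (Or.inr h))
      rw [pv_splitOn_cons sep hsep c rest hp]
      rw [ih rest (by simp at hlen; omega) hni']
      simp

-- every piece is an infix of the input and contains no separator
theorem pv_splitOn_pieces (sep : List Char) (hsep : sep ≠ []) :
    ∀ (n : Nat) (l : List Char), l.length < n →
      ((PySem.Chars.splitOn l sep).headI <+: l) ∧
      (∀ p ∈ (PySem.Chars.splitOn l sep).tail, p <:+: l) ∧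
      (∀ p ∈ PySem.Chars.splitOn l sep, ¬ sep <:+: p) := by
  intro n
  induction n with
  | zero => intro l h; omega
  | succ n ih =>
    intro l hlen
    have hslen : 1 ≤ sep.length := by
      cases sep with
      | nil => exact absurd rfl hsep
      | cons a s => simp
    cases l with
    | nil =>
      rw [pv_splitOn_nil]
      refine ⟨by simp, by simp, ?_⟩
      intro p hp
      simp at hp
      subst hp
      intro hin
      exact hsep (List.infix_nil.mp hin)
    | cons c rest =>
      by_cases hp : sep <+: (c :: rest)
      · have hle : sep.length ≤ (c :: rest).length := hp.length_le
        have hdl : (List.drop sep.length (c :: rest)).length < n := by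
          simp at hlen ⊢; omega
        obtain ⟨ihh, iht, ihs⟩ := ih (List.drop sep.length (c :: rest)) hdl
        have hsuf : List.drop sep.length (c :: rest) <:+ (c :: rest) := List.drop_suffix _ _
        have hmemD : ∀ p ∈ PySem.Chars.splitOn (List.drop sep.length (c :: rest)) sep, p <:+: (c :: rest) := by
          intro p hmem
          rw [pv_splitOn_view sep hsep (List.drop sep.length (c :: rest))] at hmem
          rcases List.mem_cons.mp hmem with h | h
          · subst h
            exact ihh.isInfix.trans hsuf.isInfix
          · exact (iht p h).trans hsuf.isInfix
        rw [pv_splitOn_cut sep hsep c rest hp]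
        refine ⟨by simp, ?_, ?_⟩
        · intro p hmem
          simp only [List.tail_cons] at hmem
          exact hmemD p hmem
        · intro p hmem
          rcases List.mem_cons.mp hmem with h | h
          · subst h
            intro hin
            exact hsep (List.infix_nil.mp hin)
          · exact ihs p h
      · obtain ⟨ihh, iht, ihs⟩ := ih rest (by simp at hlen; omega)
        rw [pv_splitOn_cons sep hsep c rest hp]
        have hheadmem : (PySem.Chars.splitOn rest sep).headI ∈ PySem.Chars.splitOn rest sep := by
          rw [pv_splitOn_view sep hsep rest]
          exact List.mem_cons_self
        have hheadpre : c :: (PySem.Chars.splitOn rest sep).headI <+: c :: rest :=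
          List.cons_prefix_cons.mpr ⟨rfl, ihh⟩
        refine ⟨hheadpre, ?_, ?_⟩
        · intro p hmem
          simp only [List.tail_cons] at hmem
          exact List.infix_cons_iff.mpr (Or.inr (iht p hmem))
        · intro p hmem
          rcases List.mem_cons.mp hmem with h | h
          · subst h
            intro hin
            rcases List.infix_cons_iff.mp hin with hpre | hinf
            · exact hp (hpre.trans hheadpre)
            · exact ihs _ hheadmem hinf
          · intro hin
            have : p ∈ PySem.Chars.splitOn rest sep := by
              rw [pv_splitOn_view sep hsep rest]
              exact List.mem_cons_of_mem _ h
            exact ihs p this hin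

-- ---- string-level corollaries ----

theorem pv_spl_no_occ (p op : String) (hne : op.toList ≠ []) (h : PySem.Str.isIn op p = false) :
    pvSpl p op = [p] := by
  have hni : ¬ op.toList <:+: p.toList := by
    rw [PySem.Str.isIn_eq] at h
    exact (PySem.Chars.isIn_eq_false_iff _ _).mp h
  rw [pv_spl_eq p op hne, pv_splitOn_no_occ op.toList hne (p.toList.length + 1) p.toList (by omega) hni]
  simp

theorem pv_spl_mem_infix (q p op : String) (hne : op.toList ≠ []) (hq : q ∈ pvSpl p op) :
    q.toList <:+: p.toList := by
  rw [pv_spl_eq p op hne] at hq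
  obtain ⟨pc, hpc, hqe⟩ := List.mem_map.mp hq
  obtain ⟨hh, ht, _⟩ := pv_splitOn_pieces op.toList hne (p.toList.length + 1) p.toList (by omega)
  have hqc : q.toList = pc := by rw [← hqe]; simp
  rw [hqc]
  rw [pv_splitOn_view op.toList hne p.toList] at hpc
  rcases List.mem_cons.mp hpc with h | h
  · subst h; exact hh.isInfix
  · exact ht pc h

theorem pv_spl_mem_no_sep (q p op : String) (hne : op.toList ≠ []) (hq : q ∈ pvSpl p op) :
    PySem.Str.isIn op q = false := by
  rw [pv_spl_eq p op hne] at hq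
  obtain ⟨pc, hpc, hqe⟩ := List.mem_map.mp hq
  obtain ⟨_, _, hs⟩ := pv_splitOn_pieces op.toList hne (p.toList.length + 1) p.toList (by omega)
  have hqc : q.toList = pc := by rw [← hqe]; simp
  rw [PySem.Str.isIn_eq, PySem.Chars.isIn_eq_false_iff, hqc]
  exact hs pc hpc

-- ---- staged-pipeline algebra ----

theorem pv_flatMap_flatMap {α β γ : Type} (l : List α) (f : α → List β) (g : β → List γ) :
    (l.flatMap f).flatMap g = l.flatMap (fun x => (f x).flatMap g) := by
  induction l with
  | nil => rfl
  | cons a l ih => simp [ih]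

theorem pv_flatMap_congr {α β : Type} (l : List α) (f g : α → List β)
    (h : ∀ a ∈ l, f a = g a) : l.flatMap f = l.flatMap g := by
  induction l with
  | nil => rfl
  | cons a l ih =>
    simp only [List.flatMap_cons]
    rw [h a List.mem_cons_self, ih (fun a ha => h a (List.mem_cons_of_mem _ ha))]

theorem pv_stg_cons (o : String) (ops ps : List String) :
    pvStg (o :: ops) ps = pvStg ops (ps.flatMap (fun p => pvSpl p o)) := rfl

theorem pv_stg_append (ops1 ops2 ps : List String) :
    pvStg (ops1 ++ ops2) ps = pvStg ops2 (pvStg ops1 ps) := by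
  simp [pvStg, List.foldl_append]

theorem pv_stg_dist : ∀ (ops ps : List String), pvStg ops ps = ps.flatMap (fun p => pvStg ops [p]) := by
  intro ops
  induction ops with
  | nil =>
    intro ps
    simp [pvStg]
  | cons o ops ih =>
    intro ps
    rw [pv_stg_cons, ih, pv_flatMap_flatMap]
    refine pv_flatMap_congr _ _ _ ?_
    intro p _
    rw [pv_stg_cons]
    simp only [List.flatMap_singleton]
    exact (ih (pvSpl p o)).symm

theorem pv_stg_nop (p : String) : ∀ (ops : List String),
    (∀ o ∈ ops, o.toList ≠ []) → (∀ o ∈ ops, PySem.Str.isIn o p = false) →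
    pvStg ops [p] = [p] := by
  intro ops
  induction ops with
  | nil => intro _ _; rfl
  | cons o ops ih =>
    intro hne hno
    rw [pv_stg_cons]
    simp only [List.flatMap_singleton]
    rw [pv_spl_no_occ p o (hne o List.mem_cons_self) (hno o List.mem_cons_self)]
    exact ih (fun o ho => hne o (List.mem_cons_of_mem _ ho)) (fun o ho => hno o (List.mem_cons_of_mem _ ho))

theorem pv_find?_split {α : Type} (p : α → Bool) : ∀ (l : List α) (r : α), l.find? p = some r →
    ∃ l1 l2, l = l1 ++ r :: l2 ∧ (∀ x ∈ l1, p x = false) ∧ p r = true := by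
  intro l
  induction l with
  | nil => intro r h; simp at h
  | cons a l ih =>
    intro r h
    by_cases ha : p a
    · rw [List.find?_cons_of_pos ha] at h
      obtain rfl : a = r := by injection h
      exact ⟨[], l, rfl, by simp, ha⟩
    · have ha' : p a = false := by
        cases hh : p a
        · rfl
        · exact absurd hh ha
      rw [List.find?_cons_of_neg (by simp [ha'])] at h
      obtain ⟨l1, l2, he, hf, hp⟩ := ih r h
      exact ⟨a :: l1, l2, by rw [he]; rfl, by
        intro x hx
        rcases List.mem_cons.mp hx with h | h
        · subst h; exact ha'
        · exact hf x h, hp⟩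

theorem pv_ops_ne : ∀ o ∈ pvOps, o.toList ≠ [] := by
  intro o ho
  have := pv_ops_len o ho
  intro hnil
  rw [hnil] at this
  simp at this

-- tokens of an operator-free string
theorem pv_tk_no_op (v : String) (h : pvOps.find? (fun r => PySem.Str.isIn r v) = none) :
    pvTk v = [v] := by
  have hall := List.find?_eq_none.mp h
  refine pv_stg_nop v pvOps pv_ops_ne ?_
  intro o ho
  cases hh : PySem.Str.isIn o v
  · rfl
  · exact absurd hh (hall o ho)

-- tokens of a string whose highest-priority operator is r: split, then tokenise the pieces
theorem pv_tk_split (v r : String) (h : pvOps.find? (fun r => PySem.Str.isIn r v) = some r) :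
    pvTk v = (pvSpl v r).flatMap pvTk := by
  obtain ⟨l1, l2, hsplit, hl1, hr⟩ := pv_find?_split _ pvOps r h
  have hmem1 : ∀ o ∈ l1, o ∈ pvOps := by
    intro o ho; rw [hsplit]; exact List.mem_append.mpr (Or.inl ho)
  have hrmem : r ∈ pvOps := by
    rw [hsplit]; exact List.mem_append.mpr (Or.inr List.mem_cons_self)
  have hrne : r.toList ≠ [] := pv_ops_ne r hrmem
  have lhs : pvTk v = (pvSpl v r).flatMap (fun p => pvStg l2 [p]) := by
    rw [pvTk, hsplit, pv_stg_append]
    rw [pv_stg_nop v l1 (fun o ho => pv_ops_ne o (hmem1 o ho)) hl1]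
    rw [pv_stg_cons]
    simp only [List.flatMap_singleton]
    exact pv_stg_dist l2 (pvSpl v r)
  rw [lhs]
  refine (pv_flatMap_congr _ _ _ ?_).symm
  intro p hp
  have hinf := pv_spl_mem_infix p v r hrne hp
  have hl1p : ∀ o ∈ l1, PySem.Str.isIn o p = false := by
    intro o ho
    cases hh : PySem.Str.isIn o p
    · rfl
    · exfalso
      have hiv : PySem.Str.isIn o v = true := by
        rw [PySem.Str.isIn_eq] at hh ⊢
        rw [PySem.Chars.isIn_iff_infix] at hh ⊢
        exact hh.trans hinf
      rw [hl1 o ho] at hiv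
      exact Bool.false_ne_true hiv
  have hrp : PySem.Str.isIn r p = false := pv_spl_mem_no_sep p v r hrne hp
  rw [pvTk, hsplit, pv_stg_append]
  rw [pv_stg_nop p l1 (fun o ho => pv_ops_ne o (hmem1 o ho)) hl1p]
  rw [pv_stg_cons]
  simp only [List.flatMap_singleton]
  rw [pv_spl_no_occ p r hrne hrp]

-- ---- set-accumulator algebra ----

theorem pv_update_add (acc s : PySem.Set String) (x : String) :
    PySem.Set.update acc (PySem.Set.add s x) = PySem.Set.add (PySem.Set.update acc s) x := by
  by_cases hx : x ∈ s
  · have h1 : PySem.Set.add s x = s := by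
      have hc : PySem.Set.contains s x = true := (PySem.Set.contains_iff s x).mpr hx
      simp only [PySem.Set.add, hc, if_true]
    have h2 : PySem.Set.add (PySem.Set.update acc s) x = PySem.Set.update acc s := by
      have hc : PySem.Set.contains (PySem.Set.update acc s) x = true :=
        (PySem.Set.contains_iff _ x).mpr ((PySem.Set.mem_update acc s x).mpr (Or.inr hx))
      simp only [PySem.Set.add, hc, if_true]
    rw [h1, h2]
  · have h1 : PySem.Set.add s x = s ++ [x] := by
      have hc : PySem.Set.contains s x = false := by
        cases h : PySem.Set.contains s x
        · rfl
        · exact absurd ((PySem.Set.contains_iff s x).mp h) hx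
      simp only [PySem.Set.add, hc, Bool.false_eq_true, if_false]
    rw [h1]
    simp [PySem.Set.update, List.foldl_append]

theorem pv_update_ofList (xs : List String) (acc : PySem.Set String) :
    PySem.Set.update acc (PySem.Set.ofList xs) = PySem.Set.update acc xs := by
  induction xs using List.reverseRecOn with
  | nil => rfl
  | append_singleton xs x ih =>
    rw [PySem.Set.ofList_append_singleton, pv_update_add, ih, PySem.Set.update_append,
      PySem.Set.update_cons, PySem.Set.update_nil]
-- ---- A's recursion unfolded ----

theorem pv_a_nil (acc : PySem.Set String) : split_for_var_go [] acc = acc := by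
  rw [split_for_var_go]

theorem pv_a_cons_some {v r : String} (h : pvOps.find? (fun r => PySem.Str.isIn r v) = some r)
    (rest : List String) (acc : PySem.Set String) :
    split_for_var_go (v :: rest) acc
      = split_for_var_go rest
          (PySem.Set.update acc (split_for_var_go (pvSpl v r) PySem.Set.empty)) := by
  rw [split_for_var_go]
  split
  · rename_i r' h'
    rw [h] at h'; cases h'; rfl
  · rename_i h'
    rw [h] at h'; cases h'

theorem pv_a_cons_none {v : String} (h : pvOps.find? (fun r => PySem.Str.isIn r v) = none)
    (rest : List String) (acc : PySem.Set String) :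
    split_for_var_go (v :: rest) acc = split_for_var_go rest (PySem.Set.add acc v) := by
  rw [split_for_var_go]
  split
  · rename_i r' h'
    rw [h] at h'; cases h'
  · rfl

-- main lemma: A's recursion = fold the staged token stream into the accumulator
theorem pv_a_eq : ∀ (n : Nat) (l : List String), pvMeasure l < n → ∀ (acc : PySem.Set String),
    split_for_var_go l acc = PySem.Set.update acc (l.flatMap pvTk) := by
  intro n
  induction n with
  | zero => intro l h; omega
  | succ n ih =>
    intro l hlt acc
    cases l with
    | nil => rw [pv_a_nil]; rfl
    | cons v rest =>
      have hmr : pvMeasure rest < n := by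
        simp only [pvMeasure, List.map_cons, List.sum_cons] at hlt ⊢; omega
      rcases hf : pvOps.find? (fun r => PySem.Str.isIn r v) with _ | r
      · rw [pv_a_cons_none hf, ih rest hmr]
        rw [List.flatMap_cons, PySem.Set.update_append, pv_tk_no_op v hf]
        rw [PySem.Set.update_cons, PySem.Set.update_nil]
      · have hin := List.find?_some (p := fun r => PySem.Str.isIn r v) hf
        have hmp : pvMeasure (pvSpl v r) < n := by
          have := pv_split_measure hin (pv_ops_len r (List.mem_of_find?_eq_some hf))
          simp only [pvMeasure, List.map_cons, List.sum_cons] at hlt this ⊢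
          have hle : pvMeasure (pvSpl v r) < 2 * v.toList.length + 1 := this
          simp only [pvMeasure] at hle
          omega
        rw [pv_a_cons_some hf, ih rest hmr]
        rw [ih (pvSpl v r) hmp PySem.Set.empty]
        rw [List.flatMap_cons, PySem.Set.update_append]
        have hemp : (PySem.Set.empty : PySem.Set String) = ([] : List String) := rfl
        have h2 : PySem.Set.update acc (PySem.Set.update PySem.Set.empty ((pvSpl v r).flatMap pvTk))
            = PySem.Set.update acc (pvTk v) := by
          rw [pv_tk_split v r hf, hemp, PySem.Set.update_nil_left, pv_update_ofList]
        rw [h2]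

-- ===== VERDICT (by name: the statement is the Claim_ definition above) =====
theorem split_for_var_spec : Claim_equal_split_for_var := by
  intro vlist _
  unfold Spec_split_for_var
  have ha : split_for_var vlist = PySem.Set.update PySem.Set.empty (vlist.flatMap pvTk) := by
    rw [split_for_var]
    exact pv_a_eq (pvMeasure vlist + 1) vlist (by omega) PySem.Set.empty
  have hb : split_for_var_alt vlist = PySem.Set.ofList (pvStg pvOps vlist) := rfl
  rw [ha, hb, pv_stg_dist]
  have hemp : (PySem.Set.empty : PySem.Set String) = ([] : List String) := rfl
  rw [hemp, PySem.Set.update_nil_left]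
  exact congrArg PySem.Set.ofList (pv_flatMap_congr _ _ _ (fun a _ => rfl))
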